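-- pv_equiv track=rewrite | github.com/Meidori/Discrete_Mathematics_Labs_2024-2025 | sem_1/lab_3/main.py | find_minimal_coverings
-- ===== SOURCE A (Python) =====
-- import itertools
--
-- def find_minimal_coverings(matrix):
--     num_columns = len(matrix[0])
--
--     ones_positions = []
--     for i in range(len(matrix)):
--         for j in range(num_columns):
--             if matrix[i][j] == 1:
--                 ones_positions.append(j)
--
--     def covers(implicants, ones_positions):
--         covered = set()
--         for i in implicants:
--             for j in range(num_columns):
--                 if matrix[i][j] == 1:
--                     covered.add(j)
--         return covered == set(ones_positions)
--
--     minimal_coverings = []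
--
--     for r in range(1, len(matrix) + 1):
--         for comb in itertools.combinations(range(len(matrix)), r):
--             if covers(comb, ones_positions):
--                 if not any(set(comb).issubset(set(existing)) for existing in minimal_coverings):
--                     minimal_coverings.append(set(comb))
--
--     return minimal_coverings
-- ===== SOURCE B (Python) =====
-- def find_minimal_coverings(matrix):
--     num_columns = len(matrix[0])
--     n = len(matrix)
--     rowcov = [[row[j] == 1 for j in range(num_columns)] for row in matrix]
--     target = [False] * num_columns
--     for rc in rowcov:
--         target = [a or b for a, b in zip(target, rc)]
--
--     def extend(start, need, cov, chosen):
--         if need == 0: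
--             return [set(chosen)] if cov == target else []
--         out = []
--         for i in range(start, n):
--             cov2 = [a or b for a, b in zip(cov, rowcov[i])]
--             out += extend(i + 1, need - 1, cov2, chosen + [i])
--         return out
--
--     result = []
--     for r in range(1, n + 1):
--         result += extend(0, r, [False] * num_columns, [])
--     return result
-- ===== Notes on version B (the rewrite author's own statement) =====
-- stated objective: faster
-- what changed: A rescans the whole matrix and rebuilds set(ones_positions) for every combination produced by itertools, and scans the whole result list with an issubset test (which is provably dead code); B precomputes one boolean coverage vector per row and the union target once, generates combinations recursively while OR-merging the vectors incrementally, and drops the dead subset scan.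
import Mathlib
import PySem

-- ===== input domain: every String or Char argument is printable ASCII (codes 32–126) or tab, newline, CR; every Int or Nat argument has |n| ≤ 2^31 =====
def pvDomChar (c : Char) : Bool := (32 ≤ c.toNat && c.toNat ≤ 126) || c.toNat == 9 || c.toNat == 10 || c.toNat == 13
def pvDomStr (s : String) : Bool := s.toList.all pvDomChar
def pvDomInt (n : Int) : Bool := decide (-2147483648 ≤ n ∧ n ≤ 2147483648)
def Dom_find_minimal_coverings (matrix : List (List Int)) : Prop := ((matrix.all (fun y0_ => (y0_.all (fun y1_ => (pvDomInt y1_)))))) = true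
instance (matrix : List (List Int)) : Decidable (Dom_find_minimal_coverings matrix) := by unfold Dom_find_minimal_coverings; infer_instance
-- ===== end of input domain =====

-- B replaces A's per-combination matrix rescan + quadratic subset scan (which is provably dead code)
-- by precomputed per-row boolean coverage vectors merged incrementally while generating combinations
-- recursively; objective: faster (measured), same return value wherever A returns.
-- A raises IndexError on an empty matrix and on rows shorter than row 0; Pre_ excludes exactly those.


-- ===== PORT A =====
-- matrix[i][j] (both indices in range on every admitted input)
def pvAGet (matrix : List (List Int)) (i j : Int) : Int :=
  (PySem.List.pyGet? ((PySem.List.pyGet? matrix i).getD []) j).getD 0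

-- itertools.combinations(xs, r), tuples as lists, in itertools' order
def pvCombos : Nat → List Int → List (List Int)
  | 0, _ => [[]]
  | _ + 1, [] => []
  | r + 1, x :: xs => (pvCombos r xs).map (fun c => x :: c) ++ pvCombos (r + 1) xs

-- the inner helper 'covers(implicants, ones_positions)'
def pvACovers (matrix : List (List Int)) (num_columns : Int)
    (implicants : List Int) (ones_positions : List Int) : Bool :=
  let covered : PySem.Set Int := implicants.foldl (fun covered i =>
    (PySem.List.pyRange 0 num_columns 1).foldl (fun covered j =>
      if pvAGet matrix i j == 1 then PySem.Set.add covered j else covered) covered) PySem.Set.empty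
  PySem.Set.equal covered (PySem.Set.ofList ones_positions)

def find_minimal_coverings (matrix : List (List Int)) : List (List Int) :=
  let num_columns : Int := ((PySem.List.pyGet? matrix 0).getD []).length
  let ones_positions : List Int :=
    (PySem.List.pyRange 0 matrix.length 1).foldl (fun acc i =>
      (PySem.List.pyRange 0 num_columns 1).foldl (fun acc j =>
        if pvAGet matrix i j == 1 then acc ++ [j] else acc) acc) []
  (PySem.List.pyRange 1 (matrix.length + 1) 1).foldl (fun mc r =>
    (pvCombos r.toNat (PySem.List.pyRange 0 matrix.length 1)).foldl (fun mc comb =>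
      if pvACovers matrix num_columns comb ones_positions
          && !(mc.any (fun existing =>
                PySem.Set.issubset (PySem.Set.ofList comb) (PySem.Set.ofList existing)))
      then mc ++ [PySem.Set.ofList comb] else mc) mc) []

-- ===== PORT B =====
-- [a or b for a, b in zip(u, v)]
def pvBor2 (u v : List Bool) : List Bool := (u.zip v).map (fun p => p.1 || p.2)

-- the recursive 'extend(start, need, cov, chosen)' of Source B
def pvBExt (rowcov : List (List Bool)) (target : List Bool) (n : Int) :
    Int → Nat → List Bool → List Int → List (List Int)
  | _, 0, cov, chosen => if cov = target then [PySem.Set.ofList chosen] else []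
  | start, need + 1, cov, chosen =>
    (PySem.List.pyRange start n 1).foldl (fun out i =>
      out ++ pvBExt rowcov target n (i + 1) need
        (pvBor2 cov ((PySem.List.pyGet? rowcov i).getD [])) (chosen ++ [i])) []

def find_minimal_coverings_alt (matrix : List (List Int)) : List (List Int) :=
  let num_columns : Int := ((PySem.List.pyGet? matrix 0).getD []).length
  let n : Int := matrix.length
  let rowcov : List (List Bool) := matrix.map (fun row =>
    (PySem.List.pyRange 0 num_columns 1).map (fun j => (PySem.List.pyGet? row j).getD 0 == 1))
  let target : List Bool := rowcov.foldl (fun t rc => pvBor2 t rc)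
    (List.replicate num_columns.toNat false)
  (PySem.List.pyRange 1 (n + 1) 1).foldl (fun result r =>
    result ++ pvBExt rowcov target n 0 r.toNat (List.replicate num_columns.toNat false) []) []

-- ===== PRECONDITION & SPEC =====
-- A indexes matrix[0] and matrix[i][j] for j < len(matrix[0]): it raises IndexError exactly on
-- an empty matrix or when some row is shorter than row 0; Pre_ excludes exactly those inputs.
def Pre_find_minimal_coverings (matrix : List (List Int)) : Prop :=
  matrix ≠ [] ∧ ∀ row ∈ matrix, (matrix.headD []).length ≤ row.length
instance (matrix : List (List Int)) : Decidable (Pre_find_minimal_coverings matrix) := by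
  unfold Pre_find_minimal_coverings; infer_instance

def pvWitness_find_minimal_coverings : List (List Int) := [[1, 0], [0, 1], [1, 1]]

def Spec_find_minimal_coverings (matrix : List (List Int)) (out : List (List Int)) : Prop := out = find_minimal_coverings_alt matrix
instance (matrix : List (List Int)) (out : List (List Int)) : Decidable (Spec_find_minimal_coverings matrix out) := by unfold Spec_find_minimal_coverings; infer_instance

-- ===== CLAIM (what is proved, stated in full; the proofs are below) =====
def Claim_equal_find_minimal_coverings : Prop := ∀ (matrix : List (List Int)), Dom_find_minimal_coverings matrix → Pre_find_minimal_coverings matrix → Spec_find_minimal_coverings matrix (find_minimal_coverings matrix)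

-- ===== LEMMAS AND PROOFS =====

-- ---- facts about pvCombos ----
theorem pvCombos_length {r : Nat} {xs : List Int} {c : List Int}
    (h : c ∈ pvCombos r xs) : c.length = r := by
  induction xs generalizing r c with
  | nil => cases r with
    | zero => simp [pvCombos] at h; simp [h]
    | succ r => simp [pvCombos] at h
  | cons x xs ih =>
    cases r with
    | zero => simp [pvCombos] at h; simp [h]
    | succ r =>
      simp only [pvCombos, List.mem_append, List.mem_map] at h
      rcases h with ⟨c', hc', rfl⟩ | h
      · simp [ih hc']
      · exact ih h

theorem pvCombos_subset {r : Nat} {xs : List Int} {c : List Int}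
    (h : c ∈ pvCombos r xs) : ∀ y ∈ c, y ∈ xs := by
  induction xs generalizing r c with
  | nil => cases r with
    | zero => simp [pvCombos] at h; simp [h]
    | succ r => simp [pvCombos] at h
  | cons x xs ih =>
    cases r with
    | zero => simp [pvCombos] at h; simp [h]
    | succ r =>
      simp only [pvCombos, List.mem_append, List.mem_map] at h
      rcases h with ⟨c', hc', rfl⟩ | h
      · intro y hy
        rcases List.mem_cons.mp hy with rfl | hy
        · simp
        · exact List.mem_cons_of_mem _ (ih hc' y hy)
      · exact fun y hy => List.mem_cons_of_mem _ (ih h y hy)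

theorem pvCombos_sorted {r : Nat} {xs : List Int} (hs : xs.Pairwise (· < ·))
    {c : List Int} (h : c ∈ pvCombos r xs) : c.Pairwise (· < ·) := by
  induction xs generalizing r c with
  | nil => cases r with
    | zero => simp [pvCombos] at h; simp [h]
    | succ r => simp [pvCombos] at h
  | cons x xs ih =>
    rw [List.pairwise_cons] at hs
    cases r with
    | zero => simp [pvCombos] at h; simp [h]
    | succ r =>
      simp only [pvCombos, List.mem_append, List.mem_map] at h
      rcases h with ⟨c', hc', rfl⟩ | h
      · exact List.pairwise_cons.mpr
          ⟨fun y hy => hs.1 y (pvCombos_subset hc' y hy), ih hs.2 hc'⟩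
      · exact ih hs.2 h

theorem pvCombos_nodup {r : Nat} {xs : List Int} (hs : xs.Pairwise (· < ·)) :
    (pvCombos r xs).Nodup := by
  induction xs generalizing r with
  | nil => cases r with
    | zero => simp [pvCombos]
    | succ r => simp [pvCombos]
  | cons x xs ih =>
    rw [List.pairwise_cons] at hs
    cases r with
    | zero => simp [pvCombos]
    | succ r =>
      simp only [pvCombos]
      refine List.Nodup.append ((ih hs.2).map ?_) (ih hs.2) ?_
      · intro a b hab; exact (List.cons_inj_right x).mp hab
      · intro c hc1 hc2
        rcases List.mem_map.mp hc1 with ⟨c', _, rfl⟩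
        have hx : x ∈ xs := pvCombos_subset hc2 x (by simp)
        exact absurd (hs.1 x hx) (lt_irrefl x)

-- two sorted nodup lists: a genuine subset relation forces shorter-or-equal, equal length forces equality
theorem pvSorted_subset_eq {a b : List Int} (ha : a.Pairwise (· < ·)) (hb : b.Pairwise (· < ·))
    (hsub : ∀ x ∈ b, x ∈ a) (hlen : a.length ≤ b.length) : a = b := by
  have hbn : b.Nodup := hb.imp (fun h => ne_of_lt h)
  have han : a.Nodup := ha.imp (fun h => ne_of_lt h)
  have hperm : b.Perm a := (hbn.subperm hsub).perm_of_length_le hlen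
  exact List.Perm.eq_of_pairwise (fun p q _ _ h1 h2 => le_antisymm h1 h2)
    (ha.imp le_of_lt) (hb.imp le_of_lt) hperm.symm

-- the 'any issubset' guard in A never fires: fold = plain filter-and-map
theorem pvDeadFilter (P : List Int → Bool) :
    ∀ (L : List (List Int)) (acc : List (List Int)),
    (∀ e ∈ acc, ∀ c ∈ L, ¬ (∀ x ∈ c, x ∈ e)) →
    L.Pairwise (fun a b => ¬ (∀ x ∈ b, x ∈ a)) →
    L.foldl (fun mc comb =>
      if P comb && !(mc.any (fun existing =>
            PySem.Set.issubset (PySem.Set.ofList comb) (PySem.Set.ofList existing)))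
      then mc ++ [PySem.Set.ofList comb] else mc) acc
    = acc ++ (L.filter P).map PySem.Set.ofList := by
  intro L
  induction L with
  | nil => intro acc _ _; simp
  | cons c L ih =>
    intro acc hacc hpw
    rw [List.pairwise_cons] at hpw
    have hany : (acc.any (fun existing =>
        PySem.Set.issubset (PySem.Set.ofList c) (PySem.Set.ofList existing))) = false := by
      rw [List.any_eq_false]
      intro e he hiss
      refine hacc e he c (by simp) ?_
      intro x hx
      have := (PySem.Set.issubset_iff _ _).mp hiss x ((PySem.Set.mem_ofList _ _).mpr hx)
      exact (PySem.Set.mem_ofList _ _).mp this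
    simp only [List.foldl_cons, hany, Bool.not_false, Bool.and_true, List.filter_cons]
    by_cases hP : P c = true
    · simp only [hP, if_true]
      rw [ih (acc ++ [PySem.Set.ofList c]) ?_ hpw.2]
      · simp
      · intro e he c2 hc2
        rcases List.mem_append.mp he with he | he
        · exact hacc e he c2 (List.mem_cons_of_mem _ hc2)
        · rcases List.mem_singleton.mp he with rfl
          intro hsub
          exact hpw.1 c2 hc2 (fun x hx => (PySem.Set.mem_ofList _ _).mp (hsub x hx))
    · have hP' : P c = false := by simpa using hP
      simp only [hP', Bool.false_eq_true, if_false,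
        ih acc (fun e he c2 hc2 => hacc e he c2 (List.mem_cons_of_mem _ hc2)) hpw.2]

-- B's recursive generator, flattened: it enumerates pvCombos and filters by the folded coverage
theorem pvBExt_eq (rowcov : List (List Bool)) (target : List Bool) (n : Int) :
    ∀ (need : Nat) (start : Int) (cov : List Bool) (chosen : List Int),
    pvBExt rowcov target n start need cov chosen =
      (pvCombos need (PySem.List.pyRange start n 1)).flatMap (fun c =>
        if c.foldl (fun v i => pvBor2 v ((PySem.List.pyGet? rowcov i).getD [])) cov = target
        then [PySem.Set.ofList (chosen ++ c)] else []) := by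
  intro need
  induction need with
  | zero => intro start cov chosen; simp [pvBExt, pvCombos]
  | succ need ihn =>
    have H : ∀ (k : Nat) (start : Int) (cov : List Bool) (chosen : List Int),
        (n - start).toNat = k →
        pvBExt rowcov target n start (need + 1) cov chosen =
          (pvCombos (need + 1) (PySem.List.pyRange start n 1)).flatMap (fun c =>
            if c.foldl (fun v i => pvBor2 v ((PySem.List.pyGet? rowcov i).getD [])) cov = target
            then [PySem.Set.ofList (chosen ++ c)] else []) := by
      intro k
      induction k with
      | zero =>
        intro start cov chosen hk
        have hle : n ≤ start := by omega
        rw [PySem.List.pyRange_one_eq_nil hle]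
        simp [pvBExt, pvCombos, PySem.List.pyRange_one_eq_nil hle]
      | succ k ihk =>
        intro start cov chosen hk
        have hlt : start < n := by omega
        have hstep : pvBExt rowcov target n start (need + 1) cov chosen =
            (PySem.List.pyRange start n 1).flatMap (fun i =>
              pvBExt rowcov target n (i + 1) need
                (pvBor2 cov ((PySem.List.pyGet? rowcov i).getD [])) (chosen ++ [i])) := by
          simp only [pvBExt]
          exact PySem.List.foldl_append_eq_flatMap _ _ []
        have hstep' : pvBExt rowcov target n (start + 1) (need + 1) cov chosen =
            (PySem.List.pyRange (start + 1) n 1).flatMap (fun i =>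
              pvBExt rowcov target n (i + 1) need
                (pvBor2 cov ((PySem.List.pyGet? rowcov i).getD [])) (chosen ++ [i])) := by
          simp only [pvBExt]
          exact PySem.List.foldl_append_eq_flatMap _ _ []
        rw [hstep, PySem.List.pyRange_one_cons hlt, List.flatMap_cons, ← hstep',
          ihk (start + 1) cov chosen (by omega)]
        -- head contribution
        rw [ihn (start + 1) (pvBor2 cov ((PySem.List.pyGet? rowcov start).getD []))
          (chosen ++ [start])]
        -- RHS: unfold combos on the cons-ed range
        simp only [pvCombos, List.flatMap_append, List.flatMap_map]
        congr 1
        apply List.flatMap_congr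
        intro c _
        simp [List.foldl_cons, List.append_assoc]
    exact fun start cov chosen => H ((n - start).toNat) start cov chosen rfl

-- membership in the conditional-add set fold (A's inner 'covered' loop)
theorem pvInnerMem (p : Int → Bool) : ∀ (l : List Int) (s : PySem.Set Int) (y : Int),
    (y ∈ l.foldl (fun s j => if p j then PySem.Set.add s j else s) s) ↔
      y ∈ s ∨ (y ∈ l ∧ p y = true) := by
  intro l
  induction l with
  | nil => simp
  | cons j l ih =>
    intro s y
    simp only [List.foldl_cons]
    by_cases hp : p j = true
    · rw [if_pos hp, ih, PySem.Set.mem_add]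
      constructor
      · rintro ((h | rfl) | h)
        · exact Or.inl h
        · exact Or.inr ⟨by simp, hp⟩
        · exact Or.inr ⟨List.mem_cons_of_mem _ h.1, h.2⟩
      · rintro (h | ⟨hy, hpy⟩)
        · exact Or.inl (Or.inl h)
        · rcases List.mem_cons.mp hy with rfl | hy
          · exact Or.inl (Or.inr rfl)
          · exact Or.inr ⟨hy, hpy⟩
    · rw [if_neg hp, ih]
      constructor
      · rintro (h | h)
        · exact Or.inl h
        · exact Or.inr ⟨List.mem_cons_of_mem _ h.1, h.2⟩
      · rintro (h | ⟨hy, hpy⟩)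
        · exact Or.inl h
        · rcases List.mem_cons.mp hy with rfl | hy
          · exact absurd hpy hp
          · exact Or.inr ⟨hy, hpy⟩

-- membership in A's 'covered' after the nested loop over implicants
theorem pvCoveredMem (matrix : List (List Int)) (C' : Int) :
    ∀ (comb : List Int) (s : PySem.Set Int) (y : Int),
    (y ∈ comb.foldl (fun covered i =>
        (PySem.List.pyRange 0 C' 1).foldl (fun covered j =>
          if pvAGet matrix i j == 1 then PySem.Set.add covered j else covered) covered) s) ↔
      y ∈ s ∨ ∃ i ∈ comb, y ∈ PySem.List.pyRange 0 C' 1 ∧ pvAGet matrix i y == 1 := by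
  intro comb
  induction comb with
  | nil => simp
  | cons i comb ih =>
    intro s y
    simp only [List.foldl_cons]
    rw [ih]
    rw [pvInnerMem (fun j => pvAGet matrix i j == 1) (PySem.List.pyRange 0 C' 1) s y]
    constructor
    · rintro ((h | ⟨hy, hq⟩) | ⟨i', hi', h⟩)
      · exact Or.inl h
      · exact Or.inr ⟨i, by simp, hy, hq⟩
      · exact Or.inr ⟨i', List.mem_cons_of_mem _ hi', h⟩
    · rintro (h | ⟨i', hi', hy, hq⟩)
      · exact Or.inl (Or.inl h)
      · rcases List.mem_cons.mp hi' with rfl | hi'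
        · exact Or.inl (Or.inr ⟨hy, hq⟩)
        · exact Or.inr ⟨i', hi', hy, hq⟩

-- membership in A's ones_positions
theorem pvOnesMem (matrix : List (List Int)) (C' : Int) (y : Int) :
    (y ∈ (PySem.List.pyRange 0 (matrix.length : Int) 1).foldl (fun acc i =>
        (PySem.List.pyRange 0 C' 1).foldl (fun acc j =>
          if pvAGet matrix i j == 1 then acc ++ [j] else acc) acc) ([] : List Int)) ↔
      ∃ i ∈ PySem.List.pyRange 0 (matrix.length : Int) 1,
        y ∈ PySem.List.pyRange 0 C' 1 ∧ pvAGet matrix i y == 1 := by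
  have hin : ∀ (i : Int) (acc : List Int),
      (PySem.List.pyRange 0 C' 1).foldl (fun acc j =>
        if pvAGet matrix i j == 1 then acc ++ [j] else acc) acc
      = acc ++ ((PySem.List.pyRange 0 C' 1).filter (fun j => pvAGet matrix i j == 1)).map
          (fun j => j) := by
    intro i acc
    exact PySem.List.foldl_append_if (fun j => pvAGet matrix i j == 1) (fun j => j) _ acc
  simp only [hin, List.map_id_fun', id]
  rw [PySem.List.foldl_append_eq_flatMap
    (fun i => (PySem.List.pyRange 0 C' 1).filter (fun j => pvAGet matrix i j == 1)) _ []]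
  simp only [List.nil_append, List.mem_flatMap, List.mem_filter]

-- pvBor2 of two equal-length vectors, entry by entry
theorem pvBor2_eq (u v : List Bool) (h : v.length = u.length) :
    pvBor2 u v = (List.range u.length).map (fun j => u.getD j false || v.getD j false) := by
  apply List.ext_getElem
  · simp [pvBor2, h]
  · intro j h1 h2
    simp only [pvBor2, List.getElem_map, List.getElem_zip, List.getElem_range]
    have hj : j < u.length := by simpa [pvBor2, h] using h1
    simp [List.getElem?_eq_getElem hj, List.getElem?_eq_getElem (show j < v.length by omega), List.getD]

theorem pvSelfMap (l : List Bool) :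
    (List.range l.length).map (fun j => l.getD j false) = l := by
  apply List.ext_getElem
  · simp
  · intro j h1 h2
    simp [List.getD, List.getElem?_eq_getElem h2]

-- folding pvBor2 over vectors of a common length C, entry by entry
theorem pvVecFold (C : Nat) : ∀ (vs : List (List Bool)) (cov : List Bool),
    cov.length = C → (∀ v ∈ vs, v.length = C) →
    vs.foldl pvBor2 cov
      = (List.range C).map (fun j => cov.getD j false || vs.any (fun v => v.getD j false)) := by
  intro vs
  induction vs with
  | nil => intro cov hc _; subst hc; simpa using (pvSelfMap cov).symm
  | cons v vs ih =>
    intro cov hc hv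
    simp only [List.foldl_cons]
    rw [pvBor2_eq cov v (by rw [hc, hv v (by simp)]),
      ih _ (by simp [hc]) (fun w hw => hv w (List.mem_cons_of_mem _ hw)), hc]
    apply List.map_eq_map_iff.mpr
    intro j hj
    have hjC : j < C := List.mem_range.mp hj
    rw [PySem.List.getD_map_range _ C j _ hjC]
    simp [Bool.or_assoc]

theorem pvFlatMapIf {α β : Type} (p : α → Prop) [DecidablePred p] (g : α → β) (l : List α) :
    l.flatMap (fun c => if p c then [g c] else []) = (l.filter (fun c => decide (p c))).map g := by
  induction l with
  | nil => rfl
  | cons c l ih => by_cases hp : p c <;> simp [hp, ih]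

-- the flattened list of all combinations A iterates over, pairwise 'no later one is a subset of an earlier one'
theorem pvPairwiseAll (m : Nat) :
    ((PySem.List.pyRange 1 ((m : Int) + 1) 1).flatMap
        (fun r => pvCombos r.toNat (PySem.List.pyRange 0 (m : Int) 1))).Pairwise
      (fun a b => ¬ (∀ x ∈ b, x ∈ a)) := by
  have hrows : (PySem.List.pyRange 0 (m : Int) 1).Pairwise (· < ·) :=
    PySem.List.pairwise_lt_pyRange_one _ _
  rw [List.pairwise_flatMap]
  constructor
  · intro r _
    refine List.Pairwise.imp_of_mem ?_ (pvCombos_nodup hrows)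
    intro a b ha hb hne hsub
    exact hne (pvSorted_subset_eq (pvCombos_sorted hrows ha) (pvCombos_sorted hrows hb) hsub
      (by rw [pvCombos_length ha, pvCombos_length hb]))
  · refine List.Pairwise.imp_of_mem ?_ (PySem.List.pairwise_lt_pyRange_one 1 ((m : Int) + 1))
    intro r1 r2 hr1 hr2 hlt a ha b hb hsub
    have hbn : b.Nodup := (pvCombos_sorted hrows hb).imp (fun h => ne_of_lt h)
    have hlen := (hbn.subperm (fun x hx => hsub x hx)).length_le
    rw [pvCombos_length ha, pvCombos_length hb] at hlen
    have h1 : 1 ≤ r1 := (PySem.List.mem_pyRange_one.mp hr1).1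
    omega

theorem pvRcget (matrix : List (List Int)) (f : List Int → List Bool) (i : Int)
    (h0 : 0 ≤ i) (h1 : i < (matrix.length : Int)) :
    (PySem.List.pyGet? (matrix.map f) i).getD [] = f ((PySem.List.pyGet? matrix i).getD []) := by
  obtain ⟨k, rfl⟩ : ∃ k : Nat, i = (k : Int) := ⟨i.toNat, (Int.toNat_of_nonneg h0).symm⟩
  have hk : k < matrix.length := by exact_mod_cast h1
  rw [PySem.List.pyGet?_natCast, PySem.List.pyGet?_natCast]
  simp [hk]

theorem pvRowEntry (row : List Int) (C : Nat) (j : Nat) (hj : j < C) :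
    ((PySem.List.pyRange 0 (C : Int) 1).map
        (fun j' => (PySem.List.pyGet? row j').getD 0 == 1)).getD j false
      = ((PySem.List.pyGet? row (j : Int)).getD 0 == 1) := by
  have hlen : j < ((PySem.List.pyRange 0 (C : Int) 1).map
      (fun j' => (PySem.List.pyGet? row j').getD 0 == 1)).length := by
    simp [PySem.List.length_pyRange_one]; omega
  rw [List.getD, List.getElem?_eq_getElem hlen]
  simp [PySem.List.getElem_pyRange_one]

theorem pvRowAny (matrix : List (List Int)) (x : Int) :
    (∃ row ∈ matrix, ((PySem.List.pyGet? row x).getD 0 == 1) = true) ↔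
      (∃ i ∈ PySem.List.pyRange 0 (matrix.length : Int) 1, (pvAGet matrix i x == 1) = true) := by
  constructor
  · rintro ⟨row, hrow, hq⟩
    obtain ⟨k, hk, rfl⟩ := List.mem_iff_getElem.mp hrow
    refine ⟨(k : Int), PySem.List.mem_pyRange_one.mpr (by constructor <;> omega), ?_⟩
    unfold pvAGet
    rw [PySem.List.pyGet?_natCast]
    simpa [List.getElem?_eq_getElem, hk] using hq
  · rintro ⟨i, hi, hq⟩
    rw [PySem.List.mem_pyRange_one] at hi
    obtain ⟨k, rfl⟩ : ∃ k : Nat, i = (k : Int) := ⟨i.toNat, (Int.toNat_of_nonneg hi.1).symm⟩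
    have hk : k < matrix.length := by exact_mod_cast hi.2
    refine ⟨matrix[k], List.mem_iff_getElem.mpr ⟨k, hk, rfl⟩, ?_⟩
    unfold pvAGet at hq
    rw [PySem.List.pyGet?_natCast] at hq
    simpa [List.getElem?_eq_getElem, hk] using hq

-- the heart: A's set-equality coverage test equals B's folded-boolean-vector test
theorem pvGood_eq (matrix : List (List Int)) (C : Nat) (comb : List Int)
    (hc : ∀ i ∈ comb, 0 ≤ i ∧ i < (matrix.length : Int)) :
    pvACovers matrix (C : Int) comb
        ((PySem.List.pyRange 0 (matrix.length : Int) 1).foldl (fun acc i =>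
          (PySem.List.pyRange 0 (C : Int) 1).foldl (fun acc j =>
            if pvAGet matrix i j == 1 then acc ++ [j] else acc) acc) [])
      = decide (comb.foldl (fun v i => pvBor2 v ((PySem.List.pyGet?
            (matrix.map (fun row => (PySem.List.pyRange 0 (C : Int) 1).map
              (fun j => (PySem.List.pyGet? row j).getD 0 == 1))) i).getD []))
          (List.replicate C false)
        = (matrix.map (fun row => (PySem.List.pyRange 0 (C : Int) 1).map
              (fun j => (PySem.List.pyGet? row j).getD 0 == 1))).foldl
            (fun t rc => pvBor2 t rc) (List.replicate C false)) := by
  set f : List Int → List Bool := fun row => (PySem.List.pyRange 0 (C : Int) 1).map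
    (fun j => (PySem.List.pyGet? row j).getD 0 == 1) with hf
  apply Bool.coe_iff_coe.mp
  rw [decide_eq_true_iff]
  unfold pvACovers
  rw [PySem.Set.equal_iff]
  -- characterise A's side
  have hA : ∀ x : Int,
      (x ∈ comb.foldl (fun covered i =>
        (PySem.List.pyRange 0 (C : Int) 1).foldl (fun covered j =>
          if pvAGet matrix i j == 1 then PySem.Set.add covered j else covered) covered)
        PySem.Set.empty) ↔
      ∃ i ∈ comb, x ∈ PySem.List.pyRange 0 (C : Int) 1 ∧ (pvAGet matrix i x == 1) = true := by
    intro x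
    rw [pvCoveredMem]
    simp [PySem.Set.empty]
  -- characterise B's side
  have hB : (comb.foldl (fun v i => pvBor2 v ((PySem.List.pyGet? (matrix.map f) i).getD []))
        (List.replicate C false)
      = (matrix.map f).foldl (fun t rc => pvBor2 t rc) (List.replicate C false)) ↔
      ∀ j : Nat, j < C →
        ((∃ i ∈ comb, (pvAGet matrix i (j : Int) == 1) = true) ↔
         (∃ i ∈ PySem.List.pyRange 0 (matrix.length : Int) 1,
            (pvAGet matrix i (j : Int) == 1) = true)) := by
    have hfold : comb.foldl (fun v i => pvBor2 v ((PySem.List.pyGet? (matrix.map f) i).getD []))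
        (List.replicate C false)
        = (comb.map (fun i => (PySem.List.pyGet? (matrix.map f) i).getD [])).foldl pvBor2
            (List.replicate C false) := by
      rw [List.foldl_map]
    rw [hfold,
      pvVecFold C _ _ (by simp) (by
        intro v hv
        obtain ⟨i, hi, rfl⟩ := List.mem_map.mp hv
        rw [pvRcget matrix f i (hc i hi).1 (hc i hi).2, hf]
        simp [PySem.List.length_pyRange_one]),
      pvVecFold C _ _ (by simp) (by
        intro v hv
        obtain ⟨row, _, rfl⟩ := List.mem_map.mp hv
        rw [hf]; simp [PySem.List.length_pyRange_one]),
      List.map_eq_map_iff]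
    constructor
    · intro h j hj
      have := h j (List.mem_range.mpr hj)
      rw [List.getD_replicate _ hj, Bool.false_or, Bool.false_or] at this
      have h2 := Bool.coe_iff_coe.mpr this
      rw [List.any_eq_true, List.any_eq_true] at h2
      constructor
      · rintro ⟨i, hi, hq⟩
        have := h2.mp ⟨(PySem.List.pyGet? (matrix.map f) i).getD [],
          List.mem_map.mpr ⟨i, hi, rfl⟩, by
            rw [pvRcget matrix f i (hc i hi).1 (hc i hi).2, hf, pvRowEntry _ C j hj]
            exact hq⟩
        obtain ⟨v, hv, hval⟩ := this
        obtain ⟨row, hrow, rfl⟩ := List.mem_map.mp hv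
        rw [hf, pvRowEntry _ C j hj] at hval
        exact (pvRowAny matrix (j : Int)).mp ⟨row, hrow, hval⟩
      · intro hex
        obtain ⟨row, hrow, hval⟩ := (pvRowAny matrix (j : Int)).mpr hex
        have := h2.mpr ⟨f row, List.mem_map.mpr ⟨row, hrow, rfl⟩, by
          rw [hf, pvRowEntry _ C j hj]; exact hval⟩
        obtain ⟨v, hv, hval'⟩ := this
        obtain ⟨i, hi, rfl⟩ := List.mem_map.mp hv
        rw [pvRcget matrix f i (hc i hi).1 (hc i hi).2, hf, pvRowEntry _ C j hj] at hval'
        exact ⟨i, hi, hval'⟩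
    · intro h j hjmem
      have hj : j < C := List.mem_range.mp hjmem
      rw [List.getD_replicate _ hj, Bool.false_or, Bool.false_or]
      apply Bool.coe_iff_coe.mp
      rw [List.any_eq_true, List.any_eq_true]
      constructor
      · rintro ⟨v, hv, hval⟩
        obtain ⟨i, hi, rfl⟩ := List.mem_map.mp hv
        rw [pvRcget matrix f i (hc i hi).1 (hc i hi).2, hf, pvRowEntry _ C j hj] at hval
        obtain ⟨row, hrow, hval'⟩ := (pvRowAny matrix (j : Int)).mpr ((h j hj).mp ⟨i, hi, hval⟩)
        exact ⟨f row, List.mem_map.mpr ⟨row, hrow, rfl⟩, by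
          rw [hf, pvRowEntry _ C j hj]; exact hval'⟩
      · rintro ⟨v, hv, hval⟩
        obtain ⟨row, hrow, rfl⟩ := List.mem_map.mp hv
        rw [hf, pvRowEntry _ C j hj] at hval
        obtain ⟨i, hi, hval'⟩ := (h j hj).mpr ((pvRowAny matrix (j : Int)).mp ⟨row, hrow, hval⟩)
        exact ⟨(PySem.List.pyGet? (matrix.map f) i).getD [],
          List.mem_map.mpr ⟨i, hi, rfl⟩, by
            rw [pvRcget matrix f i (hc i hi).1 (hc i hi).2, hf, pvRowEntry _ C j hj]
            exact hval'⟩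
  rw [hB]
  -- bridge the two characterisations
  constructor
  · intro hall j hj
    have hx := hall ((j : Int))
    rw [hA, PySem.Set.mem_ofList, pvOnesMem] at hx
    have hmem : ((j : Int)) ∈ PySem.List.pyRange 0 (C : Int) 1 :=
      PySem.List.mem_pyRange_one.mpr (by constructor <;> omega)
    constructor
    · rintro ⟨i, hi, hq⟩
      obtain ⟨i', hi', _, hq'⟩ := hx.mp ⟨i, hi, hmem, hq⟩
      exact ⟨i', hi', hq'⟩
    · rintro ⟨i, hi, hq⟩
      obtain ⟨i', hi', _, hq'⟩ := hx.mpr ⟨i, hi, hmem, hq⟩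
      exact ⟨i', hi', hq'⟩
  · intro h x
    rw [hA, PySem.Set.mem_ofList, pvOnesMem]
    by_cases hx : x ∈ PySem.List.pyRange 0 (C : Int) 1
    · have hxb := PySem.List.mem_pyRange_one.mp hx
      obtain ⟨j, rfl⟩ : ∃ j : Nat, x = (j : Int) := ⟨x.toNat, (Int.toNat_of_nonneg hxb.1).symm⟩
      have hj : j < C := by exact_mod_cast hxb.2
      constructor
      · rintro ⟨i, hi, _, hq⟩
        obtain ⟨i', hi', hq'⟩ := (h j hj).mp ⟨i, hi, hq⟩
        exact ⟨i', hi', hx, hq'⟩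
      · rintro ⟨i, hi, _, hq⟩
        obtain ⟨i', hi', hq'⟩ := (h j hj).mpr ⟨i, hi, hq⟩
        exact ⟨i', hi', hx, hq'⟩
    · constructor
      · rintro ⟨i, hi, hmem, _⟩; exact absurd hmem hx
      · rintro ⟨i, hi, hmem, _⟩; exact absurd hmem hx

-- ===== VERDICT (by name: the statement is the Claim_ definition above) =====
theorem find_minimal_coverings_spec : Claim_equal_find_minimal_coverings := by
  intro matrix _ _
  unfold Spec_find_minimal_coverings
  show find_minimal_coverings matrix = find_minimal_coverings_alt matrix
  simp only [find_minimal_coverings, find_minimal_coverings_alt]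
  rw [← List.foldl_flatMap]
  have hdead := pvDeadFilter
    (fun comb => pvACovers matrix (((PySem.List.pyGet? matrix 0).getD []).length : Int) comb
      ((PySem.List.pyRange 0 (matrix.length : Int) 1).foldl (fun acc i =>
        (PySem.List.pyRange 0 ((((PySem.List.pyGet? matrix 0).getD []).length : Nat) : Int) 1).foldl
          (fun acc j => if pvAGet matrix i j == 1 then acc ++ [j] else acc) acc) []))
    ((PySem.List.pyRange 1 ((matrix.length : Int) + 1) 1).flatMap
      (fun r => pvCombos r.toNat (PySem.List.pyRange 0 (matrix.length : Int) 1)))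
    [] (by simp) (pvPairwiseAll matrix.length)
  rw [hdead, List.nil_append, List.filter_flatMap, List.map_flatMap,
    PySem.List.foldl_append_eq_flatMap _ _ [], List.nil_append]
  apply List.flatMap_congr
  intro r hr
  rw [pvBExt_eq]
  rw [pvFlatMapIf]
  simp only [List.nil_append]
  congr 1
  apply List.filter_congr
  intro comb hcomb
  have hbounds : ∀ i ∈ comb, 0 ≤ i ∧ i < (matrix.length : Int) := fun i hi =>
    PySem.List.mem_pyRange_one.mp (pvCombos_subset hcomb i hi)
  exact pvGood_eq matrix (((PySem.List.pyGet? matrix 0).getD []).length) comb hbounds
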